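-- pv_equiv track=rewrite | github.com/william-price01/aiw | aiw/orchestrator/decompose_validator.py | _validate_task_file
-- ===== SOURCE A (Python) =====
-- _TASK_TEMPLATE_FIELDS = {
--     "Type:": "Type",
--     "Depends_on:": "Depends_on",
--     "Objective:": "Objective",
--     "File scope allowlist:": "File scope allowlist",
--     "Non-goals:": "Non-goals",
--     "Acceptance criteria (measurable):": "Acceptance criteria",
--     "Tests / checks required:": "Tests / checks required",
-- }
--
-- def _validate_task_file(relative_path: str, content: str) -> list[str]:
--     if not content.strip():
--         return [f"{relative_path} must be non-empty"]
--
--     if not _looks_like_task_template(content):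
--         return []
--
--     errors: list[str] = []
--     for marker, field_name in _TASK_TEMPLATE_FIELDS.items():
--         if not _field_has_content(content, marker):
--             errors.append(f"{relative_path} missing required field: {field_name}")
--     return errors
--
-- def _field_has_content(content: str, marker: str) -> bool:
--     lines = content.splitlines()
--     for index, line in enumerate(lines):
--         if line.startswith(marker):
--             inline_value = line[len(marker) :].strip()
--             if inline_value:
--                 return True
--
--             for trailing_line in lines[index + 1 :]:
--                 if _is_section_header(trailing_line):
--                     return False
--                 if trailing_line.strip():
--                     return True
--             return False
--     return False
--
-- def _is_section_header(line: str) -> bool: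
--     if not line.strip():
--         return False
--     if line.startswith("## "):
--         return True
--     return line.endswith(":") and not line.startswith(("- ", "* ", "  "))
--
-- def _looks_like_task_template(content: str) -> bool:
--     stripped = content.lstrip()
--     if stripped.startswith("## TASK-"):
--         return True
--     return any(marker in content for marker in _TASK_TEMPLATE_FIELDS)
-- ===== SOURCE B (Python) =====
-- _TASK_TEMPLATE_FIELDS = {
--     "Type:": "Type",
--     "Depends_on:": "Depends_on",
--     "Objective:": "Objective",
--     "File scope allowlist:": "File scope allowlist",
--     "Non-goals:": "Non-goals",
--     "Acceptance criteria (measurable):": "Acceptance criteria",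
--     "Tests / checks required:": "Tests / checks required",
-- }
--
--
-- def _is_section_header(line: str) -> bool:
--     if not line.strip():
--         return False
--     if line.startswith("## "):
--         return True
--     return line.endswith(":") and not line.startswith(("- ", "* ", "  "))
--
--
-- def _looks_like_task_template(content: str) -> bool:
--     stripped = content.lstrip()
--     if stripped.startswith("## TASK-"):
--         return True
--     return any(marker in content for marker in _TASK_TEMPLATE_FIELDS)
--
--
-- def _validate_task_file(relative_path: str, content: str) -> list[str]:
--     if not content.strip():
--         return [f"{relative_path} must be non-empty"]
--
--     if not _looks_like_task_template(content):
--         return []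
--
--     # Single forward pass: results[marker] records whether the first occurrence
--     # of that marker has content; open_marker is the field awaiting content.
--     results: dict[str, bool] = {}
--     open_marker = None
--     for line in content.splitlines():
--         if open_marker is not None:
--             if _is_section_header(line):
--                 results[open_marker] = False
--                 open_marker = None
--             elif line.strip():
--                 results[open_marker] = True
--                 open_marker = None
--         if open_marker is None:
--             for marker in _TASK_TEMPLATE_FIELDS:
--                 if marker not in results and line.startswith(marker):
--                     if line[len(marker):].strip():
--                         results[marker] = True
--                     else:
--                         open_marker = marker
--                     break
--     if open_marker is not None:
--         results[open_marker] = False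
--
--     return [
--         f"{relative_path} missing required field: {field_name}"
--         for marker, field_name in _TASK_TEMPLATE_FIELDS.items()
--         if not results.get(marker, False)
--     ]
-- ===== Notes on version B (the rewrite author's own statement) =====
-- stated objective: alternative
-- what changed: A rescans all lines once per template field (7 passes, each with a nested trailing-line scan); B splits once and makes a single forward pass with a state machine (current open field + per-marker result dict), then emits errors in field order from the dict.
import Mathlib
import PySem

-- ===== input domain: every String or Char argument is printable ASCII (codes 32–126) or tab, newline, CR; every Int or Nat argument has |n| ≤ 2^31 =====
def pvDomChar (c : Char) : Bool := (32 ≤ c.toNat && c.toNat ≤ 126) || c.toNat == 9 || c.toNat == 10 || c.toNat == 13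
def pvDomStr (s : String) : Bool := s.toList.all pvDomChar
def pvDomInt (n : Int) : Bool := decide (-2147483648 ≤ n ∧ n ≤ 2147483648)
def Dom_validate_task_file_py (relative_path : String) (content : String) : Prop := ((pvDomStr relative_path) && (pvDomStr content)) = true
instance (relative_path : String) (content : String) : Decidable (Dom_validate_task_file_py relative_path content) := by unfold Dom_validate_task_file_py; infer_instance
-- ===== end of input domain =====

-- B replaces A's per-marker rescans of the file (one scan per template field) by a single
-- forward pass over the lines that records each field's "has content" state once (objective: alternative/simpler traversal).

-- ===== PORT A =====
-- _TASK_TEMPLATE_FIELDS (dict literal, insertion order)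
def pvFields : List (String × String) :=
  [("Type:", "Type"),
   ("Depends_on:", "Depends_on"),
   ("Objective:", "Objective"),
   ("File scope allowlist:", "File scope allowlist"),
   ("Non-goals:", "Non-goals"),
   ("Acceptance criteria (measurable):", "Acceptance criteria"),
   ("Tests / checks required:", "Tests / checks required")]

-- iteration over the dict's keys
def pvMarkers : List String := pvFields.map Prod.fst

-- _is_section_header
def isSectionHeaderPy (line : String) : Bool :=
  if PySem.Str.strip line = "" then false
  else if PySem.Str.startswith line "## " then true
  else PySem.Str.endswith line ":" &&
       !(PySem.Str.startswith line "- " || PySem.Str.startswith line "* " ||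
         PySem.Str.startswith line "  ")

-- _looks_like_task_template
def looksLikeTaskTemplatePy (content : String) : Bool :=
  if PySem.Str.startswith (PySem.Str.lstrip content) "## TASK-" then true
  else pvMarkers.any (fun mk => PySem.Str.isIn mk content)

-- the inner 'for trailing_line in lines[index + 1:]' loop of _field_has_content
def pvScanTrailing (ls : List String) : Bool :=
  match ls with
  | [] => false
  | t :: ts =>
    if isSectionHeaderPy t then false
    else if PySem.Str.strip t ≠ "" then true
    else pvScanTrailing ts

-- the outer 'for index, line in enumerate(lines)' loop of _field_has_content
def pvFieldLoop (lines : List String) (marker : String) : Bool :=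
  match lines with
  | [] => false
  | l :: rest =>
    if PySem.Str.startswith l marker then
      if PySem.Str.strip (PySem.Str.slice l (some (PySem.Str.len marker)) none) ≠ "" then true
      else pvScanTrailing rest
    else pvFieldLoop rest marker

-- _field_has_content
def fieldHasContentPy (content : String) (marker : String) : Bool :=
  pvFieldLoop (PySem.Str.splitlines content) marker

-- _validate_task_file
def validate_task_file_py (relative_path : String) (content : String) : List String :=
  if PySem.Str.strip content = "" then [relative_path ++ " must be non-empty"]
  else if !looksLikeTaskTemplatePy content then []
  else
    pvFields.foldl
      (fun errs p =>
        if !(fieldHasContentPy content p.1) then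
          errs ++ [relative_path ++ " missing required field: " ++ p.2]
        else errs)
      []

-- ===== PORT B =====
-- close the currently open field (first 'if open_marker is not None' block of B's loop body)
def pvResolve (res : PySem.Dict String Bool) (op : Option String) (line : String) :
    PySem.Dict String Bool × Option String :=
  match op with
  | some m =>
    if isSectionHeaderPy line then (res.insert m false, none)
    else if PySem.Str.strip line ≠ "" then (res.insert m true, none)
    else (res, some m)
  | none => (res, none)

-- open a fresh field if the line starts with an unseen marker ('if open_marker is None: for marker …')
def pvOpen (res : PySem.Dict String Bool) (op : Option String) (line : String) :
    PySem.Dict String Bool × Option String :=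
  match op with
  | some m => (res, some m)
  | none =>
    match pvMarkers.find? (fun mk => !res.contains mk && PySem.Str.startswith line mk) with
    | some mk =>
      if PySem.Str.strip (PySem.Str.slice line (some (PySem.Str.len mk)) none) ≠ "" then
        (res.insert mk true, none)
      else (res, some mk)
    | none => (res, none)

-- one iteration of B's 'for line in content.splitlines()'
def pvStepB (st : PySem.Dict String Bool × Option String) (line : String) :
    PySem.Dict String Bool × Option String :=
  let st1 := pvResolve st.1 st.2 line
  pvOpen st1.1 st1.2 line

-- trailing 'if open_marker is not None: results[open_marker] = False'
def pvFinalize (st : PySem.Dict String Bool × Option String) : PySem.Dict String Bool :=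
  match st.2 with
  | some m => st.1.insert m false
  | none => st.1

-- _validate_task_file (B)
def validate_task_file_py_alt (relative_path : String) (content : String) : List String :=
  if PySem.Str.strip content = "" then [relative_path ++ " must be non-empty"]
  else if !looksLikeTaskTemplatePy content then []
  else
    let res := pvFinalize ((PySem.Str.splitlines content).foldl pvStepB (PySem.Dict.empty, none))
    pvFields.foldl
      (fun errs p =>
        if !(res.getD p.1 false) then
          errs ++ [relative_path ++ " missing required field: " ++ p.2]
        else errs)
      []

-- ===== PRECONDITION & SPEC =====
def Spec_validate_task_file_py (relative_path : String) (content : String) (out : List String) : Prop := out = validate_task_file_py_alt relative_path content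
instance (relative_path : String) (content : String) (out : List String) : Decidable (Spec_validate_task_file_py relative_path content out) := by unfold Spec_validate_task_file_py; infer_instance

-- ===== CLAIM (what is proved, stated in full; the proofs are below) =====
def Claim_equal_validate_task_file_py : Prop := ∀ (relative_path : String) (content : String), Dom_validate_task_file_py relative_path content → Spec_validate_task_file_py relative_path content (validate_task_file_py relative_path content)

-- ===== LEMMAS AND PROOFS =====

-- what a lookup in B's final dict must equal, depending on the pass state
def pvRHS (lines : List String) (res : PySem.Dict String Bool) (op : Option String) (m : String) : Bool :=
  if res.contains m then res.getD m false
  else if op = some m then pvScanTrailing lines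
  else if m ∈ pvMarkers then pvFieldLoop lines m
  else false

lemma markers_no_mutual_prefix :
    ∀ a ∈ pvMarkers, ∀ b ∈ pvMarkers, a.toList <+: b.toList → a = b := by decide

lemma markers_have_nonspace :
    ∀ mk ∈ pvMarkers, mk.toList.any (fun c => !PySem.Chars.isspace c) = true := by decide


lemma strip_empty_all_space (cs : List Char) (h : PySem.Chars.strip cs = []) :
    ∀ c ∈ cs, PySem.Chars.isspace c = true := by
  unfold PySem.Chars.strip PySem.Chars.rstrip PySem.Chars.lstrip at h
  rw [List.reverse_eq_nil_iff, List.dropWhile_eq_nil_iff] at h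
  intro c hc
  have hsplit : c ∈ List.takeWhile PySem.Chars.isspace cs ++ List.dropWhile PySem.Chars.isspace cs := by
    rw [List.takeWhile_append_dropWhile]; exact hc
  rcases List.mem_append.mp hsplit with h1 | h1
  · exact List.mem_takeWhile_imp h1
  · exact h c (List.mem_reverse.mpr h1)

lemma sw_iff (l p : String) : PySem.Str.startswith l p = true ↔ p.toList <+: l.toList := by
  rw [PySem.Str.startswith_eq]; exact PySem.Chars.startswith_iff _ _

lemma blank_startswith (l mk : String) (hmk : mk ∈ pvMarkers)
    (h : PySem.Str.strip l = "") : PySem.Str.startswith l mk = false := by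
  rw [Bool.eq_false_iff]
  intro hsw
  have hpre := (sw_iff l mk).mp hsw
  have hstrip : PySem.Chars.strip l.toList = [] := by
    have := congrArg String.toList h
    rwa [PySem.Str.toList_strip] at this
  obtain ⟨c, hcm, hcs⟩ := List.any_eq_true.mp (markers_have_nonspace mk hmk)
  have := strip_empty_all_space l.toList hstrip c (hpre.subset hcm)
  simp [this] at hcs

lemma markers_unique_on (l m mk : String) (hm : m ∈ pvMarkers) (hmk : mk ∈ pvMarkers)
    (h1 : PySem.Str.startswith l m = true) (h2 : PySem.Str.startswith l mk = true) : m = mk := by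
  rcases List.prefix_or_prefix_of_prefix ((sw_iff l m).mp h1) ((sw_iff l mk).mp h2) with h | h
  · exact markers_no_mutual_prefix m hm mk hmk h
  · exact (markers_no_mutual_prefix mk hmk m hm h).symm

lemma pass_lookup (lines : List String) :
    ∀ (res : PySem.Dict String Bool) (op : Option String),
      (∀ m', op = some m' → res.contains m' = false) →
      ∀ (m : String),
      (pvFinalize (lines.foldl pvStepB (res, op))).getD m false = pvRHS lines res op m := by
  induction lines with
  | nil =>
    intro res op hinv m
    cases op with
    | none =>
      by_cases hc : res.contains m
      · simp [pvFinalize, pvRHS, hc]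
      · simp [pvFinalize, pvRHS, hc, PySem.Dict.getD_of_not_contains _ _ (by simpa using hc), pvFieldLoop]
    | some m' =>
      have hc' := hinv m' rfl
      by_cases hmeq : m = m'
      · subst hmeq
        simp [pvFinalize, pvRHS, hc', pvScanTrailing]
      · simp only [pvFinalize, pvRHS, List.foldl_nil]
        rw [PySem.Dict.getD_insert]
        simp only [hmeq, if_false]
        by_cases hc : res.contains m
        · simp [hc]
        · simp [hc, PySem.Dict.getD_of_not_contains _ _ (by simpa using hc), pvFieldLoop,
                Ne.symm hmeq]
  | cons l rest ih =>
    have hopen : ∀ (res : PySem.Dict String Bool) (m : String),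
        (pvFinalize (rest.foldl pvStepB (pvOpen res none l))).getD m false =
          (if res.contains m then res.getD m false
           else if m ∈ pvMarkers then pvFieldLoop (l :: rest) m else false) := by
      intro res m
      cases hf : pvMarkers.find? (fun mk => !res.contains mk && PySem.Str.startswith l mk) with
      | none =>
        have hstate : pvOpen res none l = (res, none) := by
          simp only [pvOpen]; rw [hf]
        rw [hstate, ih res none (fun _ h => by cases h) m]
        unfold pvRHS
        by_cases hc : res.contains m
        · simp [hc]
        · simp only [hc, Bool.false_eq_true, if_false, reduceCtorEq]
          by_cases hm : m ∈ pvMarkers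
          · have hp := List.find?_eq_none.mp hf m hm
            have hcf : (!res.contains m) = true := by simp [hc]
            have hsw : PySem.Str.startswith l m = false := by
              cases hsw' : PySem.Str.startswith l m
              · rfl
              · exact absurd (by rw [hsw', hcf]; rfl) hp
            rw [PySem.Str.startswith_eq] at hsw
            simp [hm, pvFieldLoop, hsw]
          · simp [hm]
      | some mk =>
        have hmk : mk ∈ pvMarkers := List.mem_of_find?_eq_some hf
        have hpred := List.find?_some hf
        rw [Bool.and_eq_true] at hpred
        have hcmk : res.contains mk = false := by simpa using hpred.1
        have hswmk : PySem.Str.startswith l mk = true := hpred.2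
        by_cases hin : PySem.Str.strip (PySem.Str.slice l (some (PySem.Str.len mk))) = ""
        · have hstate : pvOpen res none l = (res, some mk) := by
            simp only [pvOpen]; rw [hf]; exact if_neg (not_not_intro hin)
          rw [hstate, ih res (some mk) (fun m' h => by cases h; exact hcmk) m]
          unfold pvRHS
          simp at hswmk hin
          by_cases hc : res.contains m
          · simp [hc]
          · simp only [hc, Bool.false_eq_true, if_false, Option.some.injEq]
            by_cases hmeq : mk = m
            · subst hmeq
              simp [hmk, pvFieldLoop, hswmk, hin]
            · simp only [hmeq, if_false]
              by_cases hm : m ∈ pvMarkers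
              · have hsw : PySem.Str.startswith l m = false := by
                  cases hsw' : PySem.Str.startswith l m
                  · rfl
                  · refine absurd (markers_unique_on l mk m hmk hm ?_ hsw') hmeq
                    simpa using hswmk
                rw [PySem.Str.startswith_eq] at hsw
                simp [hm, pvFieldLoop, hsw]
              · simp [hm]
        · have hstate : pvOpen res none l = (res.insert mk true, none) := by
            simp only [pvOpen]; rw [hf]; exact if_pos hin
          rw [hstate, ih _ none (fun _ h => by cases h) m]
          unfold pvRHS
          simp at hswmk hin
          by_cases hmeq : m = mk
          · subst hmeq
            simp [PySem.Dict.contains_insert, PySem.Dict.getD_insert, hcmk, hmk, pvFieldLoop,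
                  hswmk, hin]
          · rw [PySem.Dict.contains_insert, PySem.Dict.getD_insert]
            simp only [beq_iff_eq, hmeq, if_false, Bool.false_or, reduceCtorEq,
                       Bool.false_eq_true]
            by_cases hc : res.contains m
            · simp [hc]
            · simp only [hc, Bool.false_eq_true, if_false]
              by_cases hm : m ∈ pvMarkers
              · have hsw : PySem.Str.startswith l m = false := by
                  cases hsw' : PySem.Str.startswith l m
                  · rfl
                  · refine absurd (markers_unique_on l m mk hm hmk hsw' ?_) hmeq
                    simpa using hswmk
                rw [PySem.Str.startswith_eq] at hsw
                simp [hm, pvFieldLoop, hsw, hmeq]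
              · simp [hm, hmeq]
    intro res op hinv m
    cases op with
    | none =>
      have hstate : pvStepB (res, none) l = pvOpen res none l := by simp [pvStepB, pvResolve]
      rw [List.foldl_cons, hstate, hopen res m]
      simp [pvRHS]
    | some m' =>
      have hc' := hinv m' rfl
      by_cases hh : isSectionHeaderPy l = true
      · have hstate : pvStepB (res, some m') l = pvOpen (res.insert m' false) none l := by
          simp [pvStepB, pvResolve, hh, pvOpen]
        rw [List.foldl_cons, hstate, hopen _ m]
        unfold pvRHS
        by_cases hmeq : m = m'
        · subst hmeq
          simp [PySem.Dict.contains_insert, PySem.Dict.getD_insert, hc', pvScanTrailing, hh]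
        · rw [PySem.Dict.contains_insert, PySem.Dict.getD_insert]
          simp [hmeq, Ne.symm hmeq]
      · by_cases hb : PySem.Str.strip l = ""
        · have hstate : pvStepB (res, some m') l = (res, some m') := by
            simp [pvStepB, pvResolve, hh, hb, pvOpen]
          rw [List.foldl_cons, hstate, ih res (some m') hinv m]
          unfold pvRHS
          by_cases hc : res.contains m
          · simp [hc]
          · simp only [hc, Bool.false_eq_true, if_false, Option.some.injEq]
            by_cases hmeq : m' = m
            · simp [hmeq, pvScanTrailing, hh, hb]
            · simp only [hmeq, if_false]
              by_cases hm : m ∈ pvMarkers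
              · have hsw := blank_startswith l m hm hb
                rw [PySem.Str.startswith_eq] at hsw
                simp [hm, pvFieldLoop, hsw]
              · simp [hm]
        · have hstate : pvStepB (res, some m') l = pvOpen (res.insert m' true) none l := by
            simp [pvStepB, pvResolve, hh, hb, pvOpen]
          rw [List.foldl_cons, hstate, hopen _ m]
          unfold pvRHS
          by_cases hmeq : m = m'
          · subst hmeq
            simp [hc', pvScanTrailing, hh, hb]
          · rw [PySem.Dict.contains_insert, PySem.Dict.getD_insert]
            simp [hmeq, Ne.symm hmeq]

-- ===== VERDICT (by name: the statement is the Claim_ definition above) =====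
theorem validate_task_file_py_spec : Claim_equal_validate_task_file_py := by
  intro relative_path content _
  unfold Spec_validate_task_file_py validate_task_file_py validate_task_file_py_alt
  by_cases h1 : PySem.Str.strip content = ""
  · simp [h1]
  · simp only [h1, if_false]
    by_cases h2 : looksLikeTaskTemplatePy content
    · simp only [h2, Bool.not_true, Bool.false_eq_true, if_false]
      apply PySem.List.foldl_congr_mem
      intro acc p hp
      have hm : p.1 ∈ pvMarkers := List.mem_map_of_mem hp
      have := pass_lookup (PySem.Str.splitlines content) PySem.Dict.empty none
        (by intro m' h; cases h) p.1
      rw [this]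
      simp [pvRHS, PySem.Dict.contains_empty, hm, fieldHasContentPy]
    · simp [h2]
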